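-- pv_equiv track=rewrite | github.com/TaeyanG4/Baekjoon | 백준/Gold/9935. 문자열 폭발/문자열 폭발.py | solution
-- ===== SOURCE A (Python) =====
-- def solution(s, boom):
--     stack = []
--     for c in s:
--         stack.append(c)
--         if c in boom:
--             while ''.join(stack[-len(boom):]) == boom:
--                 del stack[-len(boom):]
--     return ''.join(stack) if stack else 'FRULA'
-- ===== SOURCE B (Python) =====
-- def solution(s, boom):
--     m = len(boom)
--     if m == 0:
--         return s if s else 'FRULA'
--
--     def step(q, c):
--         # largest k <= min(q+1, m) with boom[:k] a suffix of boom[:q] + c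
--         k = min(q + 1, m)
--         while k > 0 and not (boom[k - 1] == c and boom[:q].endswith(boom[:k - 1])):
--             k -= 1
--         return k
--
--     # stack entries: (char, automaton match-length state after this char)
--     stack = []
--     for c in s:
--         q = step(stack[-1][1] if stack else 0, c)
--         if q == m:
--             # this char completes boom: drop the m-1 stacked partners, don't push
--             del stack[len(stack) - (m - 1):]
--         else:
--             stack.append((c, q))
--     return ''.join(ch for ch, _ in stack) if stack else 'FRULA'
-- ===== Notes on version B (the rewrite author's own statement) =====
-- stated objective: alternative
-- what changed: Replaces A's per-character stack-suffix join-and-compare (with an inner cascading while) by a pattern-matching automaton: each stacked char carries its match-length state, advanced per char by falling back over shorter pattern prefixes, and when the state reaches len(boom) the m-1 partner entries are popped at once without pushing.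
import Mathlib
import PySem

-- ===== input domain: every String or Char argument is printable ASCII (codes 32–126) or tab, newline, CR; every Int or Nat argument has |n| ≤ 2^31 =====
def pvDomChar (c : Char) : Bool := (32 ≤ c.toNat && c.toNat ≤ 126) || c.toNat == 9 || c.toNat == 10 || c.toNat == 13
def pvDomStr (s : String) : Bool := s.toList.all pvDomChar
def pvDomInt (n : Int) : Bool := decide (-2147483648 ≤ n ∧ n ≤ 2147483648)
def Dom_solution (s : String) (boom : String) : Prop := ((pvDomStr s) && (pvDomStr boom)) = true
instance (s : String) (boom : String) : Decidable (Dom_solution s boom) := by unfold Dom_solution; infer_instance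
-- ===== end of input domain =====

-- B replaces A's stack-suffix join-and-compare with a pattern-matching automaton:
-- each stacked char carries its match-length state; objective: alternative.

-- ===== PORT A =====
-- Python's inner `while ''.join(stack[-len(boom):]) == boom: del stack[-len(boom):]`.
-- Each true iteration removes len(boom) ≥ 1 elements (a shorter stack can never equal boom),
-- so fuel = stack.length suffices; `''.join(xs) == boom` on a list of chars is `xs = boom.toList`;
-- `stack[-m:]` with m ≥ 1 is `drop (length - m)` (and the whole list when length < m,
-- which `Nat` subtraction gives).
def pvWhileDel (fuel : Nat) (bs : List Char) (stack : List Char) : List Char :=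
  match fuel with
  | 0 => stack
  | f + 1 =>
    if stack.drop (stack.length - bs.length) = bs then
      pvWhileDel f bs (stack.take (stack.length - bs.length))
    else stack

-- one iteration of A's `for c in s` body; `c in boom` for a 1-char c is char membership
def pvStepA (bs : List Char) (stack : List Char) (c : Char) : List Char :=
  let st := stack ++ [c]
  if bs.contains c then pvWhileDel st.length bs st else st

def solution (s : String) (boom : String) : String :=
  let st := s.toList.foldl (pvStepA boom.toList) []
  if st.isEmpty then "FRULA" else String.ofList st

-- ===== PORT B =====
-- B's inner `while k > 0 and not (boom[k-1] == c and boom[:q].endswith(boom[:k-1])): k -= 1`,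
-- as structural recursion on k; `endswith` on char lists is `<:+`.
def pvStepLoop (bs : List Char) (q : Nat) (c : Char) : Nat → Nat
  | 0 => 0
  | k + 1 =>
    if bs[k]? = some c ∧ bs.take k <:+ bs.take q then k + 1
    else pvStepLoop bs q c k

-- B's `step(q, c)` helper: starts at k = min(q+1, m)
def pvAutoStep (bs : List Char) (q : Nat) (c : Char) : Nat :=
  pvStepLoop bs q c (min (q + 1) bs.length)

-- one iteration of B's `for c in s` body (stack of (char, state) pairs)
def pvStepB (bs : List Char) (stack : List (Char × Nat)) (c : Char) : List (Char × Nat) :=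
  let q0 := match stack.getLast? with | some e => e.2 | none => 0
  let q := pvAutoStep bs q0 c
  if q = bs.length then stack.take (stack.length - (bs.length - 1))
  else stack ++ [(c, q)]

def solution_alt (s : String) (boom : String) : String :=
  if boom.toList = [] then (if s.toList = [] then "FRULA" else s)
  else
    let st := s.toList.foldl (pvStepB boom.toList) []
    if st.isEmpty then "FRULA" else String.ofList (st.map Prod.fst)

-- ===== PRECONDITION & SPEC =====
def Spec_solution (s : String) (boom : String) (out : String) : Prop := out = solution_alt s boom
instance (s : String) (boom : String) (out : String) : Decidable (Spec_solution s boom out) := by unfold Spec_solution; infer_instance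

-- ===== CLAIM (what is proved, stated in full; the proofs are below) =====
def Claim_equal_solution : Prop := ∀ (s : String) (boom : String), Dom_solution s boom → Spec_solution s boom (solution s boom)

-- ===== LEMMAS AND PROOFS =====

-- the largest k ≤ bs.length with bs.take k a suffix of t (the automaton's intended state)
def maxM (bs t : List Char) : Nat :=
  Nat.findGreatest (fun k => bs.take k <:+ t) bs.length

lemma maxM_spec (bs t : List Char) : bs.take (maxM bs t) <:+ t :=
  Nat.findGreatest_spec (P := fun k => bs.take k <:+ t) (Nat.zero_le _) (by simp)

lemma maxM_le (bs t : List Char) : maxM bs t ≤ bs.length := Nat.findGreatest_le _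

lemma le_maxM {bs t : List Char} {k : Nat} (hk : k ≤ bs.length)
    (h : bs.take k <:+ t) : k ≤ maxM bs t := Nat.le_findGreatest hk h

lemma maxM_nil {bs : List Char} (hb : bs ≠ []) : maxM bs [] = 0 := by
  by_contra h
  have h2 : bs.take (maxM bs []) = [] := List.suffix_nil.mp (maxM_spec bs [])
  rcases List.take_eq_nil_iff.mp h2 with h3 | h3
  · exact h h3
  · exact hb h3

lemma maxM_eq_len_iff (bs t : List Char) : maxM bs t = bs.length ↔ bs <:+ t := by
  constructor
  · intro h
    have := maxM_spec bs t
    rwa [h, List.take_length] at this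
  · intro h
    have h1 : bs.length ≤ maxM bs t := le_maxM le_rfl (by simpa using h)
    exact le_antisymm (maxM_le bs t) h1

-- suffix of a suffix: the shorter of two suffixes of t is a suffix of the longer
lemma suffix_of_suffix_length_le {u v t : List Char} (hu : u <:+ t) (hv : v <:+ t)
    (h : u.length ≤ v.length) : u <:+ v := by
  obtain ⟨a, ha⟩ := hu
  obtain ⟨b, hb⟩ := hv
  have hab : a ++ u = b ++ v := ha.trans hb.symm
  have hlen : b.length ≤ a.length := by
    have := congrArg List.length hab
    simp at this; omega
  obtain ⟨w, hw⟩ : b <+: a := by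
    have h1 : b <+: a ++ u := ⟨v, hab.symm⟩
    exact List.prefix_of_prefix_length_le h1 (List.prefix_append a u) hlen
  refine ⟨w, ?_⟩
  have : b ++ (w ++ u) = b ++ v := by rw [← List.append_assoc, hw, hab]
  exact (List.append_cancel_left this)

lemma suffix_append_singleton {u t : List Char} (c : Char) (h : u <:+ t) :
    u ++ [c] <:+ t ++ [c] := by
  obtain ⟨w, hw⟩ := h
  exact ⟨w, by rw [← List.append_assoc, hw]⟩

lemma suffix_singleton_cancel {u v : List Char} {a b : Char}
    (h : u ++ [a] <:+ v ++ [b]) : a = b ∧ u <:+ v := by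
  obtain ⟨w, hw⟩ := h
  rw [← List.append_assoc] at hw
  obtain ⟨h1, h2⟩ := List.append_inj' hw (by simp)
  exact ⟨by simpa using h2, ⟨w, h1⟩⟩

lemma take_succ_get {bs : List Char} {k : Nat} (hk : k < bs.length) :
    bs.take (k + 1) = bs.take k ++ [bs[k]] := by
  rw [List.take_add_one, List.getElem?_eq_getElem hk]; rfl

-- the loop computes Nat.findGreatest of its test
lemma pvStepLoop_eq (bs : List Char) (q : Nat) (c : Char) (n : Nat) :
    pvStepLoop bs q c n
      = Nat.findGreatest (fun k => 0 < k ∧ bs[k-1]? = some c ∧ bs.take (k-1) <:+ bs.take q) n := by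
  induction n with
  | zero => simp [pvStepLoop]
  | succ k ih =>
    rw [pvStepLoop, Nat.findGreatest_succ, ih]
    by_cases h : bs[k]? = some c ∧ bs.take k <:+ bs.take q
    · rw [if_pos h, if_pos ⟨Nat.succ_pos k, by simpa using h.1, by simpa using h.2⟩]
    · rw [if_neg h, if_neg (by rintro ⟨-, h1, h2⟩; exact h ⟨by simpa using h1, by simpa using h2⟩)]

lemma findGreatest_shrink {P : Nat → Prop} [DecidablePred P] {j : Nat}
    (h : ∀ k, P k → k ≤ j) :
    ∀ n, j ≤ n → Nat.findGreatest P n = Nat.findGreatest P j := by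
  intro n
  induction n with
  | zero => intro hj; rw [Nat.le_zero.mp hj]
  | succ m ih =>
    intro hj
    rcases Nat.lt_or_ge j (m+1) with hlt | hge
    · rw [Nat.findGreatest_succ, if_neg (fun hp => absurd (h _ hp) (by omega)), ih (by omega)]
    · rw [le_antisymm hj hge]

lemma findGreatest_congr {P Q : Nat → Prop} [DecidablePred P] [DecidablePred Q] (n : Nat)
    (h : ∀ k, 0 < k → k ≤ n → (P k ↔ Q k)) :
    Nat.findGreatest P n = Nat.findGreatest Q n := by
  induction n with
  | zero => rfl
  | succ m ih =>
    rw [Nat.findGreatest_succ, Nat.findGreatest_succ,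
      ih (fun k h1 h2 => h k h1 (by omega))]
    by_cases hp : P (m+1)
    · rw [if_pos hp, if_pos ((h (m+1) (Nat.succ_pos m) le_rfl).mp hp)]
    · rw [if_neg hp, if_neg (fun hq => hp ((h (m+1) (Nat.succ_pos m) le_rfl).mpr hq))]

-- KMP-style automaton correctness for the naive-fallback step
lemma autoStep_correct {bs t : List Char} {c : Char}
    (hlt : maxM bs t < bs.length) :
    pvAutoStep bs (maxM bs t) c = maxM bs (t ++ [c]) := by
  set m := bs.length with hm
  set q := maxM bs t with hq
  -- Q k: the loop's test; P k: the defining property of maxM on t ++ [c]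
  set Q : Nat → Prop := fun k => 0 < k ∧ bs[k-1]? = some c ∧ bs.take (k-1) <:+ bs.take q with hQ
  set P : Nat → Prop := fun k => bs.take k <:+ t ++ [c] with hP
  have hqt : bs.take q <:+ t := maxM_spec bs t
  have key : ∀ k, 0 < k → k ≤ m → (P k ↔ Q k) := by
    intro k hk0 hkm
    obtain ⟨k', rfl⟩ : ∃ k', k = k' + 1 := ⟨k - 1, by omega⟩
    have hk' : k' < bs.length := by omega
    constructor
    · intro hp
      rw [hP] at hp
      rw [take_succ_get hk'] at hp
      obtain ⟨hc, hsuf⟩ := suffix_singleton_cancel hp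
      have hk'q : k' ≤ q := le_maxM (by omega) hsuf
      have htk : bs.take k' <:+ bs.take q := by
        refine suffix_of_suffix_length_le hsuf hqt ?_
        simp [List.length_take]
        omega
      exact ⟨hk0, by simp [List.getElem?_eq_getElem hk', hc], by simpa using htk⟩
    · rintro ⟨-, h1, h2⟩
      show bs.take (k' + 1) <:+ t ++ [c]
      have hc : bs[k'] = c := by
        simpa [List.getElem?_eq_getElem hk'] using h1
      have hsuf : bs.take k' <:+ t := (by simpa using h2 : bs.take k' <:+ bs.take q).trans hqt
      rw [take_succ_get hk', hc]
      exact suffix_append_singleton c hsuf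
  have hQle : ∀ k, Q k → k ≤ min (q + 1) m := by
    rintro k ⟨hk0, h1, h2⟩
    have hkm : k ≤ m := by
      by_contra hgt
      rw [List.getElem?_eq_none (by omega)] at h1
      simp at h1
    have hPk : P k := (key k hk0 hkm).mpr ⟨hk0, h1, h2⟩
    have hsuf : bs.take (k-1) <:+ t := (by simpa using h2 : bs.take (k-1) <:+ bs.take q).trans hqt
    have : k - 1 ≤ q := le_maxM (by omega) hsuf
    omega
  have hmin : min (q + 1) m ≤ m := by omega
  calc pvAutoStep bs q c
      = Nat.findGreatest Q (min (q + 1) m) := pvStepLoop_eq bs q c _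
    _ = Nat.findGreatest Q m := (findGreatest_shrink hQle m hmin).symm
    _ = Nat.findGreatest P m := (findGreatest_congr m key).symm
    _ = maxM bs (t ++ [c]) := rfl

-- `stack[-m:] == boom` is exactly "boom is a suffix"
lemma drop_eq_iff_suffix (bs st : List Char) :
    st.drop (st.length - bs.length) = bs ↔ bs <:+ st := by
  constructor
  · intro h; rw [← h]; exact List.drop_suffix _ _
  · rintro ⟨t, rfl⟩
    have : (t ++ bs).length - bs.length = t.length := by simp
    rw [this, List.drop_left]

lemma whileDel_of_not (f : Nat) (bs st : List Char)
    (h : ¬ st.drop (st.length - bs.length) = bs) : pvWhileDel f bs st = st := by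
  cases f <;> simp [pvWhileDel, h]

lemma getLast?_of_suffix {bs st : List Char} {c : Char} (hb : bs ≠ [])
    (h : bs <:+ st ++ [c]) : bs.getLast? = some c := by
  obtain ⟨t, ht⟩ := h
  have h1 : (t ++ bs).getLast? = some c := by rw [ht]; simp
  rwa [List.getLast?_append_of_ne_nil _ hb] at h1

-- A's step when the pushed char does NOT complete boom
lemma stepA_keep {bs st : List Char} {c : Char} (hsuf : ¬ bs <:+ st ++ [c]) :
    pvStepA bs st c = st ++ [c] := by
  have hdrop : ¬ (st ++ [c]).drop ((st ++ [c]).length - bs.length) = bs := by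
    rw [drop_eq_iff_suffix]; exact hsuf
  show (if bs.contains c then pvWhileDel (st ++ [c]).length bs (st ++ [c]) else st ++ [c])
      = st ++ [c]
  split
  · exact whileDel_of_not _ _ _ hdrop
  · rfl

-- A's step when it does: the while fires exactly once (boom never an infix of the kept stack)
lemma stepA_pop {bs st : List Char} {c : Char} (hb : bs ≠ [])
    (hst : ¬ bs <:+: st) (hsuf : bs <:+ st ++ [c]) :
    pvStepA bs st c = st.take (st.length + 1 - bs.length) := by
  have hlast : bs.getLast? = some c := getLast?_of_suffix hb hsuf
  have hcont : bs.contains c := by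
    have := List.mem_of_getLast? (l := bs) hlast
    simpa [List.contains_iff_mem] using this
  have hdrop : (st ++ [c]).drop ((st ++ [c]).length - bs.length) = bs :=
    (drop_eq_iff_suffix bs (st ++ [c])).mpr hsuf
  have hm : 1 ≤ bs.length := List.length_pos_iff.mpr hb
  have hk : (st ++ [c]).length - bs.length ≤ st.length := by
    simp only [List.length_append, List.length_singleton]; omega
  have htake : (st ++ [c]).take ((st ++ [c]).length - bs.length)
      = st.take ((st ++ [c]).length - bs.length) :=
    List.take_append_of_le_length hk
  set r := (st ++ [c]).take ((st ++ [c]).length - bs.length) with hr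
  have hrinf : ∀ l, l <:+: r → l <:+: st := by
    intro l hl
    exact hl.trans (htake ▸ (List.take_prefix _ st).isInfix)
  have hrnot : ¬ r.drop (r.length - bs.length) = bs := by
    rw [drop_eq_iff_suffix]
    intro hs
    exact hst (hrinf bs hs.isInfix)
  have hA : pvStepA bs st c = r := by
    show (if bs.contains c then pvWhileDel (st ++ [c]).length bs (st ++ [c]) else st ++ [c]) = r
    rw [if_pos hcont]
    have hlen : (st ++ [c]).length = st.length + 1 := by simp
    rw [hlen]
    show pvWhileDel (st.length + 1) bs (st ++ [c]) = r
    rw [pvWhileDel, if_pos (by rw [hlen] at hdrop ⊢; exact hdrop)]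
    rw [← hr]
    exact whileDel_of_not _ _ _ hrnot
  rw [hA, htake]
  congr 1
  simp

-- invariant: every stacked state is the exact automaton state of its prefix, and < len(boom)
def States (bs : List Char) (stB : List (Char × Nat)) : Prop :=
  ∀ n (h : n < stB.length),
    stB[n].2 = maxM bs ((stB.take (n+1)).map Prod.fst) ∧ stB[n].2 < bs.length

lemma states_no_infix {bs : List Char} {stB : List (Char × Nat)} (hb : bs ≠ [])
    (hS : States bs stB) : ¬ bs <:+: stB.map Prod.fst := by
  rintro ⟨u, v, huv⟩
  have hlen : u.length + bs.length + v.length = (stB.map Prod.fst).length := by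
    have := congrArg List.length huv
    simp only [List.length_append] at this
    omega
  have hsuf : bs <:+ (stB.map Prod.fst).take (u.length + bs.length) := by
    have h1 : (stB.map Prod.fst).take (u.length + bs.length) = u ++ bs := by
      rw [← huv, List.append_assoc]
      rw [List.take_append]
      simp
    rw [h1]; exact List.suffix_append u bs
  have hbpos : 0 < bs.length := List.length_pos_iff.mpr hb
  have hn1 : u.length + bs.length - 1 < stB.length := by
    have h2 : (stB.map Prod.fst).length = stB.length := by simp
    omega
  obtain ⟨hstate, hlt⟩ := hS (u.length + bs.length - 1) hn1
  have htake : (stB.take (u.length + bs.length)).map Prod.fst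
      = (stB.map Prod.fst).take (u.length + bs.length) := by simp [List.map_take]
  have hfull : maxM bs ((stB.map Prod.fst).take (u.length + bs.length)) = bs.length :=
    (maxM_eq_len_iff _ _).mpr hsuf
  rw [show u.length + bs.length - 1 + 1 = u.length + bs.length by omega, htake, hfull] at hstate
  omega

lemma getLast?_states {bs : List Char} {stB : List (Char × Nat)} (hb : bs ≠ [])
    (hS : States bs stB) :
    (match stB.getLast? with | some e => e.2 | none => 0) = maxM bs (stB.map Prod.fst)
    ∧ (match stB.getLast? with | some e => e.2 | none => 0) < bs.length := by
  rcases stB.eq_nil_or_concat' with rfl | ⟨ys, e, rfl⟩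
  · simp [maxM_nil hb, List.length_pos_iff.mpr hb]
  · have hn : ys.length < (ys ++ [e]).length := by simp
    obtain ⟨h1, h2⟩ := hS ys.length hn
    have hget : (ys ++ [e])[ys.length] = e := by
      rw [List.getElem_append_right le_rfl]
      simp
    have htake : (ys ++ [e]).take (ys.length + 1) = ys ++ [e] := by
      rw [List.take_of_length_le (by simp)]
    rw [hget, htake] at h1
    simp only [List.getLast?_concat]
    exact ⟨h1, hget ▸ h2⟩

-- the two folds run in lockstep: A's stack is the chars of B's, and B's states stay exact
lemma fold_lockstep {bs : List Char} (hb : bs ≠ []) :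
    ∀ (cs : List Char) (stB : List (Char × Nat)), States bs stB →
      cs.foldl (pvStepA bs) (stB.map Prod.fst) = (cs.foldl (pvStepB bs) stB).map Prod.fst := by
  intro cs
  induction cs with
  | nil => intro stB _; rfl
  | cons c cs ih =>
    intro stB hS
    set stA := stB.map Prod.fst with hAdef
    obtain ⟨hq0, hq0lt⟩ := getLast?_states hb hS
    set q0 := (match stB.getLast? with | some e => e.2 | none => 0) with hq0def
    have hq : pvAutoStep bs q0 c = maxM bs (stA ++ [c]) := by
      rw [hq0]; exact autoStep_correct (hq0 ▸ hq0lt)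
    have hnoinf : ¬ bs <:+: stA := states_no_infix hb hS
    have hlenA : stA.length = stB.length := by simp [hAdef]
    by_cases hfull : pvAutoStep bs q0 c = bs.length
    · -- completed boom: A pops len(boom), B keeps its prefix and skips the push
      have hsuf : bs <:+ stA ++ [c] := by
        rw [← maxM_eq_len_iff, ← hq, hfull]
      have hstepA : pvStepA bs stA c = stA.take (stA.length + 1 - bs.length) :=
        stepA_pop hb hnoinf hsuf
      have hstepB : pvStepB bs stB c = stB.take (stB.length - (bs.length - 1)) := by
        show (let q0' := match stB.getLast? with | some e => e.2 | none => 0;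
              let q := pvAutoStep bs q0' c;
              if q = bs.length then stB.take (stB.length - (bs.length - 1))
              else stB ++ [(c, q)]) = _
        simp only [← hq0def, if_pos hfull]
      have hbpos : 0 < bs.length := List.length_pos_iff.mpr hb
      have hSt : States bs (stB.take (stB.length - (bs.length - 1))) := by
        intro n hn
        have hn' : n < stB.length := lt_of_lt_of_le hn (by simp [List.length_take])
        obtain ⟨h1, h2⟩ := hS n hn'
        have hgete : (stB.take (stB.length - (bs.length - 1)))[n] = stB[n] :=
          List.getElem_take
        have hle : n + 1 ≤ stB.length - (bs.length - 1) := by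
          simp [List.length_take] at hn; omega
        rw [hgete, List.take_take, min_eq_left hle]
        exact ⟨h1, h2⟩
      have heq : stA.take (stA.length + 1 - bs.length)
          = (stB.take (stB.length - (bs.length - 1))).map Prod.fst := by
        rw [hAdef, ← List.map_take]
        congr 2
        simp only [List.length_map]
        omega
      rw [List.foldl_cons, List.foldl_cons, hstepA, hstepB, heq, ih _ hSt]
    · -- no completion: both push
      have hsuf : ¬ bs <:+ stA ++ [c] := by
        rw [← maxM_eq_len_iff, ← hq]; exact hfull
      have hstepA : pvStepA bs stA c = stA ++ [c] := stepA_keep hsuf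
      have hstepB : pvStepB bs stB c = stB ++ [(c, pvAutoStep bs q0 c)] := by
        show (let q0' := match stB.getLast? with | some e => e.2 | none => 0;
              let q := pvAutoStep bs q0' c;
              if q = bs.length then stB.take (stB.length - (bs.length - 1))
              else stB ++ [(c, q)]) = _
        simp only [← hq0def, if_neg hfull]
      have hSt : States bs (stB ++ [(c, pvAutoStep bs q0 c)]) := by
        intro n hn
        simp only [List.length_append, List.length_singleton] at hn
        rcases Nat.lt_or_ge n stB.length with h | h
        · obtain ⟨h1, h2⟩ := hS n h
          have hget : (stB ++ [(c, pvAutoStep bs q0 c)])[n] = stB[n] :=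
            List.getElem_append_left h
          have htk : (stB ++ [(c, pvAutoStep bs q0 c)]).take (n+1) = stB.take (n+1) :=
            List.take_append_of_le_length (by omega)
          rw [hget, htk]
          exact ⟨h1, h2⟩
        · have hn' : n = stB.length := by omega
          subst hn'
          have hget : (stB ++ [(c, pvAutoStep bs q0 c)])[stB.length]
              = (c, pvAutoStep bs q0 c) := by
            rw [List.getElem_append_right le_rfl]; simp
          have htk : (stB ++ [(c, pvAutoStep bs q0 c)]).take (stB.length + 1)
              = stB ++ [(c, pvAutoStep bs q0 c)] := by
            rw [List.take_of_length_le (by simp)]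
          rw [hget, htk]
          constructor
          · simp only [List.map_append, List.map_cons, List.map_nil]
            exact hq
          · exact lt_of_le_of_ne (hq ▸ maxM_le bs (stA ++ [c])) hfull
      have heq : stA ++ [c] = (stB ++ [(c, pvAutoStep bs q0 c)]).map Prod.fst := by
        simp [hAdef]
      rw [List.foldl_cons, List.foldl_cons, hstepA, hstepB, heq, ih _ hSt]

-- A with an empty boom just pushes every char
lemma foldA_nil_boom (cs st : List Char) : cs.foldl (pvStepA []) st = st ++ cs := by
  induction cs generalizing st with
  | nil => simp
  | cons c cs ih =>
    have h : pvStepA [] st c = st ++ [c] := by simp [pvStepA]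
    simp [List.foldl_cons, h, ih]

-- ===== VERDICT (by name: the statement is the Claim_ definition above) =====
theorem solution_spec : Claim_equal_solution := by
  intro s boom _
  show solution s boom = solution_alt s boom
  unfold solution solution_alt
  by_cases hb : boom.toList = []
  · rw [if_pos hb, hb, foldA_nil_boom]
    simp only [List.nil_append]
    by_cases hs : s.toList = []
    · simp [hs]
    · rw [if_neg hs, if_neg (by simpa [List.isEmpty_iff] using hs)]
      exact congrArg String.ofList rfl |>.trans (by
        show String.ofList s.toList = s
        simp [String.ofList])
  · rw [if_neg hb]
    have h := fold_lockstep hb s.toList [] (by intro n hn; simp at hn)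
    simp only [List.map_nil] at h
    rw [h]
    simp [List.isEmpty_iff]
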